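-- pv_equiv track=rewrite | github.com/jyb2605/jackkong_algo | 20200405/jaeyeonlee0621_라면공장.py | solution
-- ===== SOURCE A (Python) =====
-- import heapq
--
-- def solution(stock, dates, supplies, k):
--     '''
--     idea : 해당 기간 안에서 가장 많은 공급을 하는 일자를 택해겠다
--
--     '''
--
--     answer = 0
--     idx = 0
--     heap = []
--
--     while stock < k:
--         for i in range(idx, len(dates)):
--             if stock < dates[i]: break
--             heapq.heappush(heap, -supplies[i])
--             idx = i + 1
--         stock += (heapq.heappop(heap) * -1)
--         answer += 1
--
--     return answer
-- ===== SOURCE B (Python) =====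
-- def solution(stock, dates, supplies, k):
--     answer = 0
--     pool = []
--     for i in range(len(dates)):
--         while stock < k and stock < dates[i]:
--             pool.sort()
--             stock += pool.pop()
--             answer += 1
--         if stock >= k:
--             break
--         pool.append(supplies[i])
--     while stock < k:
--         pool.sort()
--         stock += pool.pop()
--         answer += 1
--     return answer
-- ===== Notes on version B (the rewrite author's own statement) =====
-- stated objective: alternative
-- what changed: B reverses the traversal: instead of A's outer refill loop that absorbs an index window into a heapq min-heap of negated supplies and pops each round, B walks the supply days once in a single for-loop and pops the maximum from a plain sort-and-pop-last list only when the stock runs short of the next date (or of k in a final drain).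
-- outside the precondition, e.g. on solution(0, [0, 100], [2], 2): A returns 1, B returns 1
import Mathlib
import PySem

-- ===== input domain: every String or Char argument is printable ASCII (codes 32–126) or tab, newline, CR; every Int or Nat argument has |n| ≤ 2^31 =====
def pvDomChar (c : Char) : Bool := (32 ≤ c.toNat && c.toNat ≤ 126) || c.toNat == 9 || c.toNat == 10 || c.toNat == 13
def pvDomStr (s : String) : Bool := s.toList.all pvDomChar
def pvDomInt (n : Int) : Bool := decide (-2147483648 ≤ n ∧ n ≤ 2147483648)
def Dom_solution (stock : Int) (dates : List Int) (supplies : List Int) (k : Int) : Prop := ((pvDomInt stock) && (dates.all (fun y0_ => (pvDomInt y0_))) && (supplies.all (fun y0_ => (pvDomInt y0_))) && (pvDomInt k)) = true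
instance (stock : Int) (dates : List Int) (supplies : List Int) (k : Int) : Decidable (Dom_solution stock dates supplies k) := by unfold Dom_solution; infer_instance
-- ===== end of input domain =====

-- B reverses the traversal: instead of A's outer refill loop that absorbs a window into a
-- min-heap of negated supplies and pops each round, B walks the supply days once and, only
-- when the stock runs short of the next date (or of k at the end), pops the maximum from a
-- plain list kept by sort-and-pop-last.  Alternative structure, same greedy, no heapq.

-- ===== PORT A =====
-- heapq is modelled at ADT level: the heap is an ascending-sorted list, heappush is ordered
-- insertion, heappop takes the head (= the minimum, exactly heappop's contract).
-- A's inner `for i in range(idx, len(dates))` with `break`; `supplies.getD i 0` is Python's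
-- supplies[i], in range on every input Pre_solution admits.
def scanA (dates supplies : List Int) (stock : Int) : Nat → Nat → List Int → Nat × List Int
  | i, idx, heap =>
    if h : i < dates.length then
      if stock < dates[i] then (idx, heap)
      else scanA dates supplies stock (i + 1) (i + 1)
             (heap.orderedInsert (· ≤ ·) (-(supplies.getD i 0)))
    else (idx, heap)
  termination_by i _ _ => dates.length - i

-- A's `while stock < k` loop; fuel `len(dates)+1` is enough because every iteration pops one
-- pushed element and at most `len(dates)` are ever pushed; on an empty heap Python's heappop
-- raises IndexError (excluded by Pre_solution) and the port returns `answer`.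
def loopA (dates supplies : List Int) (k : Int) : Nat → Int → Nat → List Int → Int → Int
  | 0, _, _, _, answer => answer
  | fuel + 1, stock, idx, heap, answer =>
    if stock < k then
      match scanA dates supplies stock idx idx heap with
      | (idx', heap') =>
        match heap' with
        | [] => answer
        | x :: rest => loopA dates supplies k fuel (stock + x * (-1)) idx' rest (answer + 1)
    else answer

def solution (stock : Int) (dates : List Int) (supplies : List Int) (k : Int) : Int :=
  loopA dates supplies k (dates.length + 1) stock 0 [] 0

-- ===== PORT B =====
-- B's `for i in range(len(dates))` with the embedded `while stock < k and stock < dates[i]`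
-- refill loop, the `if stock >= k: break`, and the trailing `while stock < k` drain (the
-- `i ≥ len(dates)` branch) are merged into one recursion over (i, stock, pool, answer);
-- `pool.sort(); stock += pool.pop()` is PySem's stable sort followed by taking the last
-- element (pop of an empty pool raises IndexError in Python — excluded by Pre_solution —
-- and the port returns `answer`).
def loopB (dates supplies : List Int) (k : Int) : Nat → Nat → Int → List Int → Int → Int
  | 0, _, _, _, answer => answer
  | fuel + 1, i, stock, pool, answer =>
    if h : i < dates.length then
      if stock < k ∧ stock < dates[i] then
        match (PySem.List.sorted pool (fun x => x)).getLast? with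
        | none => answer
        | some m => loopB dates supplies k fuel i (stock + m)
            (PySem.List.sorted pool (fun x => x)).dropLast (answer + 1)
      else if k ≤ stock then answer
      else loopB dates supplies k fuel (i + 1) stock (pool ++ [supplies.getD i 0]) answer
    else
      if stock < k then
        match (PySem.List.sorted pool (fun x => x)).getLast? with
        | none => answer
        | some m => loopB dates supplies k fuel i (stock + m)
            (PySem.List.sorted pool (fun x => x)).dropLast (answer + 1)
      else answer

-- fuel 2*len(dates)+2 is enough: each step either pushes one of the len(dates) supplies or
-- pops one pushed element (at most len(dates)+1 pops, the last on an empty pool).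
def solution_alt (stock : Int) (dates : List Int) (supplies : List Int) (k : Int) : Int :=
  loopB dates supplies k (2 * dates.length + 2) 0 stock [] 0

-- ===== PRECONDITION & SPEC =====
-- Pre_solution excludes exactly the inputs on which A raises IndexError (heappop on an empty
-- heap, or reading supplies[i] past its end) together with the malformed paired-array inputs
-- where supplies is shorter than dates, on which A returns only when the extra dates happen
-- never to be reached.  For equal-or-longer supplies it is exact: with stock < k, A returns
-- iff some prefix p is unlockable date by date using the nonnegative supplies seen so far
-- and its nonnegative supplies sum to at least k - stock (negative supplies are pushed but
-- never popped on a terminating run: popping a negative can only shrink stock and the heap).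
def Pre_solution (stock : Int) (dates : List Int) (supplies : List Int) (k : Int) : Prop :=
  k ≤ stock ∨
  (dates.length ≤ supplies.length ∧
   ∃ p ∈ List.range (dates.length + 1),
     (∀ j ∈ List.range p,
        dates.getD j 0 ≤ stock + (((supplies.take j).filter (fun s => 0 ≤ s)).sum)) ∧
     k ≤ stock + (((supplies.take p).filter (fun s => 0 ≤ s)).sum))
instance (stock : Int) (dates : List Int) (supplies : List Int) (k : Int) : Decidable (Pre_solution stock dates supplies k) := by unfold Pre_solution; infer_instance

def pvWitness_solution : Int × List Int × List Int × Int := (0, [0, 2], [3, 5], 8)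

def Spec_solution (stock : Int) (dates : List Int) (supplies : List Int) (k : Int) (out : Int) : Prop := out = solution_alt stock dates supplies k
instance (stock : Int) (dates : List Int) (supplies : List Int) (k : Int) (out : Int) : Decidable (Spec_solution stock dates supplies k out) := by unfold Spec_solution; infer_instance

-- ===== CLAIM (what is proved, stated in full; the proofs are below) =====
def Claim_equal_solution : Prop := ∀ (stock : Int) (dates : List Int) (supplies : List Int) (k : Int), Dom_solution stock dates supplies k → Pre_solution stock dates supplies k → Spec_solution stock dates supplies k (solution stock dates supplies k)

-- ===== LEMMAS AND PROOFS =====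
-- (the bisimulation below holds for every input; the Pre_solution hypothesis is only needed
-- so that the claim is about inputs where the Python programs actually return)

-- Proof-side description of B's push phase: from position i, push supplies while the date is
-- unlocked (mirrors A's scanA with idx = i).
def scanB (dates supplies : List Int) (stock : Int) : Nat → List Int → Nat × List Int
  | idx, pool =>
    if h : idx < dates.length then
      if dates[idx] ≤ stock then
        scanB dates supplies stock (idx + 1) (pool ++ [supplies.getD idx 0])
      else (idx, pool)
    else (idx, pool)
  termination_by idx _ => dates.length - idx

-- The two scans advance the index identically and push the same multiset of supplies:
-- A keeps its heap as a sorted list of negated values, B appends the raw values.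
lemma scan_eq (dates supplies : List Int) (stock : Int) :
    ∀ fuel i heap pool, dates.length - i ≤ fuel →
    heap.Pairwise (· ≤ ·) → (heap.map (fun x => -x)).Perm pool →
    (scanA dates supplies stock i i heap).1 = (scanB dates supplies stock i pool).1 ∧
    (scanA dates supplies stock i i heap).2.Pairwise (· ≤ ·) ∧
    ((scanA dates supplies stock i i heap).2.map (fun x => -x)).Perm
      (scanB dates supplies stock i pool).2 := by
  intro fuel
  induction fuel with
  | zero =>
    intro i heap pool hfuel hs hp
    have hi : ¬ i < dates.length := by omega
    rw [scanA, scanB]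
    simp [hi, hs, hp]
  | succ fuel ih =>
    intro i heap pool hfuel hs hp
    rw [scanA, scanB]
    by_cases hi : i < dates.length
    · simp only [hi, dif_pos]
      by_cases hb : stock < dates[i]
      · have hb' : ¬ dates[i] ≤ stock := by omega
        simp [hb, hb', hs, hp]
      · have hb' : dates[i] ≤ stock := by omega
        simp only [hb, if_pos hb', ite_false]
        have hs' : (heap.orderedInsert (· ≤ ·) (-(supplies.getD i 0))).Pairwise (· ≤ ·) :=
          List.Pairwise.orderedInsert _ _ hs
        have hp' : ((heap.orderedInsert (· ≤ ·) (-(supplies.getD i 0))).map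
            (fun x => -x)).Perm (pool ++ [supplies.getD i 0]) := by
          have h1 := (List.perm_orderedInsert (· ≤ ·) (-(supplies.getD i 0)) heap).map
            (fun x : Int => -x)
          simp only [List.map_cons, neg_neg] at h1
          exact h1.trans ((hp.cons _).trans (List.perm_append_singleton _ _).symm)
        exact ih (i + 1) _ _ (by omega) hs' hp'
    · simp [hi, hs, hp]

-- scanB's bookkeeping: the index never moves back, stays in range, stops only at the end or
-- at a locked date, and pushes exactly one element per index step.
lemma scanB_len (dates supplies : List Int) (stock : Int) :
    ∀ fuel i pool, dates.length - i ≤ fuel → i ≤ dates.length →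
    i ≤ (scanB dates supplies stock i pool).1 ∧
    (scanB dates supplies stock i pool).1 ≤ dates.length ∧
    (scanB dates supplies stock i pool).2.length + i =
      pool.length + (scanB dates supplies stock i pool).1 ∧
    ((scanB dates supplies stock i pool).1 < dates.length →
      stock < dates.getD (scanB dates supplies stock i pool).1 0) := by
  intro fuel
  induction fuel with
  | zero =>
    intro i pool hfuel hle
    have hi : ¬ i < dates.length := by omega
    have hstep : scanB dates supplies stock i pool = (i, pool) := by
      rw [scanB, dif_neg hi]
    rw [hstep]
    exact ⟨le_refl _, hle, by simp, fun h => absurd h hi⟩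
  | succ fuel ih =>
    intro i pool hfuel hle
    by_cases hi : i < dates.length
    · by_cases hb : dates[i] ≤ stock
      · have hstep : scanB dates supplies stock i pool =
            scanB dates supplies stock (i + 1) (pool ++ [supplies.getD i 0]) := by
          rw [scanB, dif_pos hi, if_pos hb]
        obtain ⟨h1, h2, h3, h4⟩ := ih (i + 1) (pool ++ [supplies.getD i 0]) (by omega) (by omega)
        rw [hstep]
        refine ⟨by omega, h2, ?_, h4⟩
        have hl : (pool ++ [supplies.getD i 0]).length = pool.length + 1 := by simp
        omega
      · have hstep : scanB dates supplies stock i pool = (i, pool) := by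
          rw [scanB, dif_pos hi, if_neg hb]
        rw [hstep]
        refine ⟨le_refl _, hle, by simp, fun _ => ?_⟩
        have : dates.getD i 0 = dates[i] := List.getD_eq_getElem dates 0 hi
        show stock < dates.getD i 0
        omega
    · have hstep : scanB dates supplies stock i pool = (i, pool) := by
        rw [scanB, dif_neg hi]
      rw [hstep]
      exact ⟨le_refl _, hle, by simp, fun h => absurd h hi⟩

-- On a pool that is a permutation of the negations of a sorted heap, Python's sort returns
-- exactly the reversed negated heap.
lemma sorted_pool (heap pool : List Int) (hs : heap.Pairwise (· ≤ ·))
    (hp : (heap.map (fun x => -x)).Perm pool) :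
    PySem.List.sorted pool (fun x => x) = (heap.map (fun x => -x)).reverse := by
  apply PySem.List.sorted_id_eq_of_perm_of_pairwise
  · exact (List.reverse_perm _).trans hp
  · rw [List.pairwise_reverse]
    exact hs.map _ (fun a b h => by simpa using neg_le_neg h)

-- B, already past k: only the break (or the final while test) fires, no pop, no push.
lemma loopB_done (dates supplies : List Int) (k : Int) :
    ∀ fuel i stock pool answer, ¬ stock < k →
    loopB dates supplies k fuel i stock pool answer = answer := by
  intro fuel
  cases fuel with
  | zero => intro i stock pool answer _; rfl
  | succ fuel =>
    intro i stock pool answer hk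
    rw [loopB]
    by_cases hi : i < dates.length
    · have hnot : ¬ (stock < k ∧ stock < dates[i]) := fun ⟨h1, _⟩ => hk h1
      simp [hi, hnot, show k ≤ stock by omega]
    · simp [hi, hk]

-- B, short of k with the next date unlocked: B walks the push phase exactly as scanB does,
-- spending one unit of fuel per pushed supply.
lemma loopB_absorb (dates supplies : List Int) (k : Int) (stock : Int) (hk : stock < k) :
    ∀ d i pool fuel answer, dates.length - i ≤ d → i ≤ dates.length →
    (scanB dates supplies stock i pool).1 - i ≤ fuel →
    loopB dates supplies k fuel i stock pool answer =
    loopB dates supplies k (fuel - ((scanB dates supplies stock i pool).1 - i))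
      (scanB dates supplies stock i pool).1 stock
      (scanB dates supplies stock i pool).2 answer := by
  intro d
  induction d with
  | zero =>
    intro i pool fuel answer hd hile hfuel
    have hi : ¬ i < dates.length := by omega
    have hstep : scanB dates supplies stock i pool = (i, pool) := by
      rw [scanB, dif_neg hi]
    rw [hstep]
    simp
  | succ d ih =>
    intro i pool fuel answer hd hile hfuel
    by_cases hi : i < dates.length
    · by_cases hb : dates[i] ≤ stock
      · have hstep : scanB dates supplies stock i pool =
            scanB dates supplies stock (i + 1) (pool ++ [supplies.getD i 0]) := by
          rw [scanB, dif_pos hi, if_pos hb]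
        obtain ⟨g1, g2, g3, g4⟩ := scanB_len dates supplies stock
          (dates.length - (i + 1)) (i + 1) (pool ++ [supplies.getD i 0]) (le_refl _) (by omega)
        rw [hstep] at hfuel ⊢
        have hdelta : 1 ≤ fuel := by omega
        obtain ⟨fuel', rfl⟩ : ∃ f, fuel = f + 1 := ⟨fuel - 1, by omega⟩
        have hunf : loopB dates supplies k (fuel' + 1) i stock pool answer =
            loopB dates supplies k fuel' (i + 1) stock
              (pool ++ [supplies.getD i 0]) answer := by
          rw [loopB]
          have hnot : ¬ (stock < k ∧ stock < dates[i]) := fun ⟨_, h2⟩ => by omega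
          simp [hi, hnot, show ¬ k ≤ stock by omega]
        rw [hunf, ih (i + 1) (pool ++ [supplies.getD i 0]) fuel' answer (by omega)
          (by omega) (by omega)]
        have harith : fuel' + 1 -
            ((scanB dates supplies stock (i + 1) (pool ++ [supplies.getD i 0])).1 - i) =
            fuel' - ((scanB dates supplies stock (i + 1)
              (pool ++ [supplies.getD i 0])).1 - (i + 1)) := by omega
        rw [harith]
      · have hstep : scanB dates supplies stock i pool = (i, pool) := by
          rw [scanB, dif_pos hi, if_neg hb]
        rw [hstep]
        simp
    · have hstep : scanB dates supplies stock i pool = (i, pool) := by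
        rw [scanB, dif_neg hi]
      rw [hstep]
      simp

-- B at a pop point (end of dates, or next date locked): one unfolding pops the maximum.
lemma loopB_pop (dates supplies : List Int) (k : Int) (fuel i : Nat) (stock : Int)
    (pool : List Int) (answer : Int) (hk : stock < k)
    (hstop : ¬ i < dates.length ∨ (i < dates.length ∧ stock < dates.getD i 0)) :
    loopB dates supplies k (fuel + 1) i stock pool answer =
    match (PySem.List.sorted pool (fun x => x)).getLast? with
    | none => answer
    | some m => loopB dates supplies k fuel i (stock + m)
        (PySem.List.sorted pool (fun x => x)).dropLast (answer + 1) := by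
  rw [loopB]
  rcases hstop with hi | ⟨hi, hd⟩
  · simp [hi, hk]
  · have hg : dates.getD i 0 = dates[i] := List.getD_eq_getElem dates 0 hi
    have hcond : stock < k ∧ stock < dates[i] := ⟨hk, by omega⟩
    simp [hi, hcond]

-- The bisimulation: A's refill loop against B's day walk, from matching states.
lemma loop_eq (dates supplies : List Int) (k : Int) :
    ∀ fuelA fuelB stock idx heap pool answer,
    heap.length + (dates.length - idx) < fuelA →
    2 * (dates.length - idx) + pool.length < fuelB →
    idx ≤ dates.length →
    heap.Pairwise (· ≤ ·) → (heap.map (fun x => -x)).Perm pool →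
    loopA dates supplies k fuelA stock idx heap answer =
    loopB dates supplies k fuelB idx stock pool answer := by
  intro fuelA
  induction fuelA with
  | zero => intro fuelB stock idx heap pool answer hfA _ _ _ _; omega
  | succ fuelA ih =>
    intro fuelB stock idx heap pool answer hfA hfB hidx hs hp
    rw [loopA]
    by_cases hk : stock < k
    · simp only [hk, if_pos]
      obtain ⟨h1, h2, h3⟩ := scan_eq dates supplies stock (dates.length - idx) idx heap pool
        (le_refl _) hs hp
      obtain ⟨g1, g2, g3, g4⟩ := scanB_len dates supplies stock (dates.length - idx) idx pool
        (le_refl _) hidx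
      have hlenBA : (scanA dates supplies stock idx idx heap).2.length =
          (scanB dates supplies stock idx pool).2.length := by
        have := h3.length_eq; simpa using this
      have hlp : heap.length = pool.length := by simpa using hp.length_eq
      rw [loopB_absorb dates supplies k stock hk (dates.length - idx) idx pool fuelB answer
        (le_refl _) hidx (by omega)]
      have hstop : ¬ (scanB dates supplies stock idx pool).1 < dates.length ∨
          ((scanB dates supplies stock idx pool).1 < dates.length ∧
            stock < dates.getD (scanB dates supplies stock idx pool).1 0) := by
        by_cases h : (scanB dates supplies stock idx pool).1 < dates.length
        · exact Or.inr ⟨h, g4 h⟩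
        · exact Or.inl h
      obtain ⟨fuel', hf'⟩ :
          ∃ f, fuelB - ((scanB dates supplies stock idx pool).1 - idx) = f + 1 :=
        ⟨fuelB - ((scanB dates supplies stock idx pool).1 - idx) - 1, by omega⟩
      rw [hf', loopB_pop dates supplies k fuel' (scanB dates supplies stock idx pool).1 stock
        (scanB dates supplies stock idx pool).2 answer hk hstop]
      have hq : PySem.List.sorted (scanB dates supplies stock idx pool).2 (fun x => x) =
          ((scanA dates supplies stock idx idx heap).2.map (fun x => -x)).reverse :=
        sorted_pool _ _ h2 h3
      match hh : (scanA dates supplies stock idx idx heap).2 with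
      | [] =>
        rw [hh] at hq
        simp only [List.map_nil, List.reverse_nil] at hq
        simp [hq]
      | x :: rest =>
        rw [hh] at hq
        simp only [List.map_cons, List.reverse_cons] at hq
        rw [hq, List.getLast?_concat, List.dropLast_concat]
        show loopA dates supplies k fuelA (stock + x * (-1))
            (scanA dates supplies stock idx idx heap).1 rest (answer + 1) =
          loopB dates supplies k fuel' (scanB dates supplies stock idx pool).1 (stock + (-x))
            ((rest.map (fun x => -x)).reverse) (answer + 1)
        have harith : stock + x * (-1) = stock + (-x) := by ring_nf
        rw [harith, h1]
        rw [hh] at h2 hlenBA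
        have hxl : (x :: rest).length = rest.length + 1 := by simp
        have hrl : ((rest.map (fun x => -x)).reverse).length = rest.length := by simp
        exact ih fuel' _ (scanB dates supplies stock idx pool).1 rest _ _ (by omega)
          (by omega) g2 (List.Pairwise.of_cons h2) (List.reverse_perm _).symm
    · rw [loopB_done dates supplies k fuelB idx stock pool answer hk]
      simp [hk]

-- ===== VERDICT (by name: the statement is the Claim_ definition above) =====
theorem solution_spec : Claim_equal_solution := by
  intro stock dates supplies k _ _
  unfold Spec_solution solution solution_alt
  exact loop_eq dates supplies k (dates.length + 1) (2 * dates.length + 2) stock 0 [] [] 0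
    (by simp) (by simp) (by omega) (by simp) (by simp)
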